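-- pv_equiv track=rewrite | github.com/pypi-data/pypi-mirror-209 | packages/k8s-smuggler/k8s_smuggler-0.0.0-py3-none-any.whl/k8s_smuggler/kubernetes/client.py | _select_preferred_gv
-- ===== SOURCE A (Python) =====
-- def _select_preferred_gv(gv1:str, gv2:str) -> str:
--     if gv1 == gv2:
--         return gv1
--
--     prerelease_strings = ["beta", "alpha"]
--     gv1_priority = next((i + 1 for i, s in enumerate(prerelease_strings) if s in gv1), 0)
--     gv2_priority = next((i + 1 for i, s in enumerate(prerelease_strings) if s in gv2), 0)
--     if gv1_priority < gv2_priority: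
--         return gv1
--     if gv2_priority < gv1_priority:
--         return gv2
--
--     if len(gv2) < len(gv1):
--         return gv2
--     if len(gv1) < len(gv2):
--         return gv1
--
--     return sorted([gv1, gv2])[0]
-- ===== SOURCE B (Python) =====
-- def _select_preferred_gv(gv1: str, gv2: str) -> str:
--     # Staged elimination: repeatedly keep only the candidates minimal under the
--     # next criterion (prerelease marker rank, then length, then the string itself).
--     def marker_rank(g: str) -> int:
--         if "beta" in g:
--             return 1
--         if "alpha" in g:
--             return 2
--         return 0
--
--     candidates = [gv1, gv2]
--     for crit in (marker_rank, len, lambda g: g):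
--         best = min(crit(g) for g in candidates)
--         candidates = [g for g in candidates if crit(g) == best]
--         if len(candidates) == 1:
--             break
--     return candidates[0]
-- ===== Notes on version B (the rewrite author's own statement) =====
-- stated objective: alternative
-- what changed: Replaces the gv1==gv2 guard, the enumerate/next priority computation and the cascade of pairwise priority/length/lexicographic comparisons by a staged-elimination loop: iterate over a tuple of criteria (marker rank, len, identity), each round filtering the candidate list down to the criterion's minimizers, breaking when one candidate survives.
import Mathlib
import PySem

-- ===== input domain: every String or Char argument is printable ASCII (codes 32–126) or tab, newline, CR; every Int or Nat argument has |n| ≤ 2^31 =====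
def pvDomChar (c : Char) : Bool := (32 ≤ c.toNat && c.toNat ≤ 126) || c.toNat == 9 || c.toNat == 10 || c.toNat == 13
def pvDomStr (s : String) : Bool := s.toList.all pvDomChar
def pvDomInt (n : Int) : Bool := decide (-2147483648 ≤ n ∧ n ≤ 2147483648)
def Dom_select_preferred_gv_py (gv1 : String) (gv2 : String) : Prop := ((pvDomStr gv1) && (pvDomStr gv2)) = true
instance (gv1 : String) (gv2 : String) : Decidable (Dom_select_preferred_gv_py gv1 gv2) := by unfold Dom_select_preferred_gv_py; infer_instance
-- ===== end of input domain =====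

-- B replaces A's guard-plus-cascade of pairwise comparisons by a staged elimination:
-- a loop over the three criteria that filters the candidate list down to the
-- criterion's minimizers — simpler and uniform; same cost.

-- ===== PORT A =====
-- next((i + 1 for i, s in enumerate(prerelease_strings) if s in gv), 0)
def pvPriorityA (gv : String) : Int :=
  (((PySem.List.enumerate ["beta", "alpha"] 0).filterMap
      (fun p => if PySem.Str.isIn p.2 gv then some ((p.1 : Int) + 1) else none)).headD 0)

def select_preferred_gv_py (gv1 : String) (gv2 : String) : String :=
  if gv1 == gv2 then gv1
  else
    let gv1_priority := pvPriorityA gv1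
    let gv2_priority := pvPriorityA gv2
    if gv1_priority < gv2_priority then gv1
    else if gv2_priority < gv1_priority then gv2
    else if PySem.Str.len gv2 < PySem.Str.len gv1 then gv2
    else if PySem.Str.len gv1 < PySem.Str.len gv2 then gv1
    else PySem.List.pyGetD (PySem.List.sorted [gv1, gv2] (fun x => x) false) 0 ""

-- ===== PORT B =====
-- a criterion value: int for marker_rank/len, string for the identity criterion
inductive PvKey where
  | i : Int → PvKey
  | s : String → PvKey
deriving DecidableEq

def pvKeyLt : PvKey → PvKey → Bool
  | .i a, .i b => a < b
  | .s a, .s b => decide (a < b)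
  | _, _ => false

-- marker_rank(g)
def pvMarkerRank (g : String) : Int :=
  if PySem.Str.isIn "beta" g then 1
  else if PySem.Str.isIn "alpha" g then 2
  else 0

-- the tuple of criteria the loop iterates over
def pvCriteria : List (String → PvKey) :=
  [fun g => .i (pvMarkerRank g), fun g => .i (PySem.Str.len g), fun g => .s g]

-- min(crit(g) for g in candidates): first minimal value (Python's min)
def pvMinKey (ks : List PvKey) : Option PvKey :=
  ks.foldl (fun acc k =>
    match acc with
    | none => some k
    | some m => if pvKeyLt k m then some k else some m) none

-- the for-loop over criteria with its early break at a single survivor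
def pvRefine : List (String → PvKey) → List String → List String
  | [], cands => cands
  | crit :: rest, cands =>
    match pvMinKey (cands.map crit) with
    | none => cands
    | some best =>
      let cands' := cands.filter (fun g => crit g == best)
      if cands'.length == 1 then cands' else pvRefine rest cands'

def select_preferred_gv_py_alt (gv1 : String) (gv2 : String) : String :=
  PySem.List.pyGetD (pvRefine pvCriteria [gv1, gv2]) 0 ""

-- ===== PRECONDITION & SPEC =====
def Spec_select_preferred_gv_py (gv1 : String) (gv2 : String) (out : String) : Prop := out = select_preferred_gv_py_alt gv1 gv2
instance (gv1 : String) (gv2 : String) (out : String) : Decidable (Spec_select_preferred_gv_py gv1 gv2 out) := by unfold Spec_select_preferred_gv_py; infer_instance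

-- ===== CLAIM (what is proved, stated in full; the proofs are below) =====
def Claim_equal_select_preferred_gv_py : Prop := ∀ (gv1 : String) (gv2 : String), Dom_select_preferred_gv_py gv1 gv2 → Spec_select_preferred_gv_py gv1 gv2 (select_preferred_gv_py gv1 gv2)

-- ===== LEMMAS AND PROOFS =====

-- A's generator priority equals B's marker_rank
theorem priorityA_eq_marker (g : String) : pvPriorityA g = pvMarkerRank g := by
  unfold pvPriorityA pvMarkerRank
  simp only [PySem.List.enumerate, List.filterMap]
  split_ifs <;> simp_all

theorem sorted_pair (a b : String) :
    PySem.List.sorted [a, b] (fun x => x) false = if b < a then [b, a] else [a, b] := by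
  simp [PySem.List.sorted, PySem.List.insertBy]

-- ===== VERDICT (by name: the statement is the Claim_ definition above) =====
theorem select_preferred_gv_py_spec : Claim_equal_select_preferred_gv_py := by
  intro gv1 gv2 _
  unfold Spec_select_preferred_gv_py select_preferred_gv_py select_preferred_gv_py_alt pvCriteria
  rw [priorityA_eq_marker, priorityA_eq_marker, sorted_pair]
  rcases lt_trichotomy (pvMarkerRank gv1) (pvMarkerRank gv2) with hm | hm | hm
  · have hne : gv1 ≠ gv2 := by intro h; rw [h] at hm; exact lt_irrefl _ hm
    simp [pvRefine, pvMinKey, pvKeyLt, hm, not_lt_of_gt hm, hm.ne', hne,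
      PySem.List.pyGetD, PySem.List.pyGet?, PySem.List.pyIdx?]
  · rcases lt_trichotomy gv1.length gv2.length with hl | hl | hl
    · have hne : gv1 ≠ gv2 := by intro h; rw [h] at hl; exact lt_irrefl _ hl
      simp [pvRefine, pvMinKey, pvKeyLt, hm, hl, not_lt_of_gt hl, hl.ne', hne,
        Nat.cast_lt, Nat.cast_inj,
        PySem.List.pyGetD, PySem.List.pyGet?, PySem.List.pyIdx?]
    · by_cases heq : gv1 = gv2
      · subst heq
        simp [pvRefine, pvMinKey, pvKeyLt, PySem.List.pyGetD, PySem.List.pyGet?, PySem.List.pyIdx?]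
      · have hne2 : gv2 ≠ gv1 := Ne.symm heq
        rcases lt_trichotomy gv1.toList gv2.toList with hs | hs | hs
        · simp [pvRefine, pvMinKey, pvKeyLt, hm, hl, not_lt_of_gt hs, hne2, heq,
            PySem.List.pyGetD, PySem.List.pyGet?, PySem.List.pyIdx?]
        · exact absurd (String.toList_injective hs) heq
        · simp [pvRefine, pvMinKey, pvKeyLt, hm, hl, hs, heq,
            PySem.List.pyGetD, PySem.List.pyGet?, PySem.List.pyIdx?]
    · have hne : gv1 ≠ gv2 := by intro h; rw [h] at hl; exact lt_irrefl _ hl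
      simp [pvRefine, pvMinKey, pvKeyLt, hm, hl, hl.ne', hne,
        Nat.cast_lt, Nat.cast_inj,
        PySem.List.pyGetD, PySem.List.pyGet?, PySem.List.pyIdx?]
  · have hne : gv1 ≠ gv2 := by intro h; rw [h] at hm; exact lt_irrefl _ hm
    simp [pvRefine, pvMinKey, pvKeyLt, hm, not_lt_of_gt hm, hm.ne', hne,
      PySem.List.pyGetD, PySem.List.pyGet?, PySem.List.pyIdx?]
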